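-- pv_equiv track=rewrite | github.com/AmazingAmpharos/OoT-Randomizer | Hints.py | get_raw_text
-- ===== SOURCE A (Python) =====
-- def get_raw_text(string):
--     text = ''
--     for char in string:
--         if char == '^':
--             text += '\x04' # box break
--         elif char == '&':
--             text += '\x01' # new line
--         elif char == '@':
--             text += '\x0F' # print player name
--         elif char == '#':
--             text += '\x05\x40' # sets color to white
--         else:
--             text += char
--     return text
-- ===== SOURCE B (Python) =====
-- def get_raw_text(string):
--     string = string.replace('^', '\x04')  # box break
--     string = string.replace('&', '\x01')  # new line
--     string = string.replace('@', '\x0F')  # print player name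
--     string = string.replace('#', '\x05\x40')  # sets color to white
--     return string
-- ===== Notes on version B (the rewrite author's own statement) =====
-- stated objective: faster
-- what changed: Replaced A's Python-level character-by-character loop with if/elif ladder and string accumulation by four staged whole-string str.replace passes (each a C-level scan; '@' replaced before '#' so the introduced '\x40' byte is never touched).
import Mathlib
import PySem

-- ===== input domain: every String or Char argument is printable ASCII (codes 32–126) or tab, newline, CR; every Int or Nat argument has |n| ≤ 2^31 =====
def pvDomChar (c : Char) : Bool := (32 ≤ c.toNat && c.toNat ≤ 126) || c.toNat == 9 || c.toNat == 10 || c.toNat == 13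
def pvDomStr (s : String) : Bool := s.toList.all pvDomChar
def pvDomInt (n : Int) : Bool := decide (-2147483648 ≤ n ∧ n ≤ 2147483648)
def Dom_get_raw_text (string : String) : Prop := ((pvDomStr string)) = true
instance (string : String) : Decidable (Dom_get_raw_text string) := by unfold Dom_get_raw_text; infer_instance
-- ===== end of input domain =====

-- B replaces A's single per-character pass with if/elif ladder by four staged
-- whole-string replace passes (Python str.replace), '@' before '#'; idiomatic, same behaviour.


-- ===== PORT A =====
-- literal port of A's loop: accumulate text, branch per special character
def get_raw_text (string : String) : String :=
  String.ofList (string.toList.foldl (fun text char =>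
    if char = '^' then text ++ ['\x04']
    else if char = '&' then text ++ ['\x01']
    else if char = '@' then text ++ ['\x0F']
    else if char = '#' then text ++ ['\x05', '\x40']
    else text ++ [char]) [])

-- ===== PORT B =====
-- port of B: four staged whole-string replace passes
def get_raw_text_alt (string : String) : String :=
  let s1 := PySem.Str.replace string "^" "\x04"
  let s2 := PySem.Str.replace s1 "&" "\x01"
  let s3 := PySem.Str.replace s2 "@" "\x0F"
  let s4 := PySem.Str.replace s3 "#" "\x05\x40"
  s4

-- ===== PRECONDITION & SPEC =====
def Spec_get_raw_text (string : String) (out : String) : Prop := out = get_raw_text_alt string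
instance (string : String) (out : String) : Decidable (Spec_get_raw_text string out) := by unfold Spec_get_raw_text; infer_instance

-- ===== CLAIM (what is proved, stated in full; the proofs are below) =====
def Claim_equal_get_raw_text : Prop := ∀ (string : String), Dom_get_raw_text string → Spec_get_raw_text string (get_raw_text string)

-- ===== LEMMAS AND PROOFS =====

-- single-character substitution performed by one replace pass
def pvSubst (o : Char) (new : List Char) (c : Char) : List Char :=
  if c = o then new else [c]

-- A's loop body, as the per-character substitution it performs
def pvSub (c : Char) : List Char :=
  if c = '^' then ['\x04']
  else if c = '&' then ['\x01']
  else if c = '@' then ['\x0F']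
  else if c = '#' then ['\x05', '\x40']
  else [c]

theorem pvFoldl_eq_flatMap (l : List Char) (acc : List Char) :
    l.foldl (fun text char =>
      if char = '^' then text ++ ['\x04']
      else if char = '&' then text ++ ['\x01']
      else if char = '@' then text ++ ['\x0F']
      else if char = '#' then text ++ ['\x05', '\x40']
      else text ++ [char]) acc = acc ++ l.flatMap pvSub := by
  induction l generalizing acc with
  | nil => simp
  | cons c t ih =>
    simp only [List.foldl_cons, List.flatMap_cons, ih, pvSub]
    split_ifs <;> simp

theorem pvGo_single (o : Char) (new : List Char) (fuel : Nat) (l acc : List Char)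
    (h : l.length ≤ fuel) :
    PySem.Chars.replace.go [o] new fuel l acc = acc.reverse ++ l.flatMap (pvSubst o new) := by
  induction l generalizing fuel acc with
  | nil =>
    cases fuel <;> simp [PySem.Chars.replace.go]
  | cons c t ih =>
    cases fuel with
    | zero => simp at h
    | succ fuel =>
      have hf : t.length ≤ fuel := by simpa using h
      by_cases hc : c = o
      · subst hc
        simp [PySem.Chars.replace.go, List.isPrefixOf, ih fuel _ hf, pvSubst]
      · have : [o].isPrefixOf (c :: t) = false := by
          simp [List.isPrefixOf]; exact fun hco => (hc hco.symm).elim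
        simp [PySem.Chars.replace.go, this, ih fuel _ hf, pvSubst, hc]

theorem pvReplace_single (o : Char) (new : List Char) (l : List Char) :
    PySem.Chars.replace l [o] new = l.flatMap (pvSubst o new) := by
  simpa using pvGo_single o new l.length l [] le_rfl

-- ===== VERDICT (by name: the statement is the Claim_ definition above) =====
theorem get_raw_text_spec : Claim_equal_get_raw_text := by
  intro s _
  unfold Spec_get_raw_text get_raw_text get_raw_text_alt
  rw [pvFoldl_eq_flatMap]
  show _ = PySem.Str.replace (PySem.Str.replace (PySem.Str.replace (PySem.Str.replace s "^" "\x04") "&" "\x01") "@" "\x0F") "#" "\x05\x40"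
  simp only [PySem.Str.replace, String.toList_ofList]
  have e1 : "^".toList = ['^'] := rfl
  have e2 : "&".toList = ['&'] := rfl
  have e3 : "@".toList = ['@'] := rfl
  have e4 : "#".toList = ['#'] := rfl
  rw [e1, e2, e3, e4]
  rw [pvReplace_single '^', pvReplace_single '&', pvReplace_single '@', pvReplace_single '#']
  rw [List.flatMap_assoc, List.flatMap_assoc, List.flatMap_assoc]
  simp only [List.nil_append]
  congr 1
  apply List.flatMap_congr
  intro c _
  by_cases h1 : c = '^'
  · subst h1; simp [pvSub, pvSubst]
  · by_cases h2 : c = '&'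
    · subst h2; simp [pvSub, pvSubst]
    · by_cases h3 : c = '@'
      · subst h3; simp [pvSub, pvSubst]
      · by_cases h4 : c = '#'
        · subst h4; simp [pvSub, pvSubst]
        · simp [pvSub, pvSubst, h1, h2, h3, h4]
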